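-- pv_equiv track=rewrite | github.com/lancygao2019/CNX_InventorySystem | database.py | _int_to_barcode
-- ===== SOURCE A (Python) =====
-- _BARCODE_CHARS = '23456789ABCDEFGHJKMNPQRSTVWXYZ'  # 30 characters
--
-- _BARCODE_BASE = len(_BARCODE_CHARS)                 # 30
--
-- def _int_to_barcode(n):
--     """Convert a positive integer to a barcode string using the safe alphabet."""
--     if n == 0:
--         return _BARCODE_CHARS[0]
--     result = []
--     while n:
--         n, rem = divmod(n, _BARCODE_BASE)
--         result.append(_BARCODE_CHARS[rem])
--     return ''.join(reversed(result))
-- ===== SOURCE B (Python) =====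
-- _BARCODE_CHARS = '23456789ABCDEFGHJKMNPQRSTVWXYZ'  # 30 characters
--
--
-- def _int_to_barcode(n):
--     """Convert a positive integer to a barcode string using the safe alphabet."""
--     if n == 0:
--         return _BARCODE_CHARS[0]
--     p = 1
--     while p * 30 <= n:
--         p *= 30
--     out = []
--     while p:
--         d, n = divmod(n, p)
--         out.append(_BARCODE_CHARS[d])
--         p //= 30
--     return ''.join(out)
-- ===== Notes on version B (the rewrite author's own statement) =====
-- stated objective: alternative
-- what changed: B emits digits most-significant-first by first finding the largest base power not exceeding n and peeling digits off the top with divmod by decreasing powers, instead of A's least-significant-first remainder loop with a final reverse.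
import Mathlib
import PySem

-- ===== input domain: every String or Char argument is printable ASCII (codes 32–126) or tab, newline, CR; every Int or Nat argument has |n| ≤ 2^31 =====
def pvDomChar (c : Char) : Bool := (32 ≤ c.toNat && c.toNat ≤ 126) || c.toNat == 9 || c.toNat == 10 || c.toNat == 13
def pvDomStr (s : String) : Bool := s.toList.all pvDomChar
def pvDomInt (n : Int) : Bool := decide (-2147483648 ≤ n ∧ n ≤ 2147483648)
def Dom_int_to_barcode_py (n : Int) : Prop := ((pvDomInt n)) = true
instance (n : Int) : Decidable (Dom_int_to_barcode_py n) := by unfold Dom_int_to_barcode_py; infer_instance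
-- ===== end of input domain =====

-- B emits digits most-significant-first via the largest base power not exceeding n, instead of A's lsd loop + reverse; objective: alternative.


-- ===== PORT A =====
-- _BARCODE_CHARS, as a list of characters
def pvChars : List Char := "23456789ABCDEFGHJKMNPQRSTVWXYZ".toList

-- _BARCODE_CHARS[i]; the index is always 0 ≤ i < 30 where it is used, so the default is never taken
def pvDigit (i : Int) : Char := (PySem.List.pyGet? pvChars i).getD ' '

-- A's while loop: fuel is a totality guard only (for 0 ≤ n the loop stops within n.toNat+1 steps)
def pvLoopA : Nat → Int → List Char → List Char
  | 0, _, acc => acc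
  | f + 1, n, acc =>
      if n = 0 then acc
      else pvLoopA f (PySem.Int.floordiv n 30) (acc ++ [pvDigit (PySem.Int.mod n 30)])

def int_to_barcode_py (n : Int) : String :=
  if n = 0 then String.ofList [pvDigit 0]
  else String.ofList (pvLoopA (n.toNat + 1) n []).reverse

-- ===== PORT B =====
-- 'while p * 30 <= n: p *= 30' — fuel is a totality guard only (≤ 7 iterations for n ≤ 2^31)
def pvFindP : Nat → Int → Int → Int
  | 0, p, _ => p
  | f + 1, p, n => if p * 30 ≤ n then pvFindP f (p * 30) n else p

-- 'while p: d, n = divmod(n, p); out.append(chars[d]); p //= 30'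
def pvLoopB : Nat → Int → Int → List Char → List Char
  | 0, _, _, acc => acc
  | f + 1, p, n, acc =>
      if p = 0 then acc
      else pvLoopB f (PySem.Int.floordiv p 30) (PySem.Int.mod n p)
             (acc ++ [pvDigit (PySem.Int.floordiv n p)])

def int_to_barcode_py_alt (n : Int) : String :=
  if n = 0 then String.ofList [pvDigit 0]
  else String.ofList (pvLoopB 64 (pvFindP 64 1 n) n [])

-- ===== PRECONDITION & SPEC =====
-- Pre_ excludes negative n: there Python's A never returns (divmod floors, so n stays negative and the loop runs forever).
def Pre_int_to_barcode_py (n : Int) : Prop := 0 ≤ n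
instance (n : Int) : Decidable (Pre_int_to_barcode_py n) := by unfold Pre_int_to_barcode_py; infer_instance
def pvWitness_int_to_barcode_py : Int := (901)

def Spec_int_to_barcode_py (n : Int) (out : String) : Prop := out = int_to_barcode_py_alt n
instance (n : Int) (out : String) : Decidable (Spec_int_to_barcode_py n out) := by unfold Spec_int_to_barcode_py; infer_instance

-- ===== CLAIM (what is proved, stated in full; the proofs are below) =====
def Claim_equal_int_to_barcode_py : Prop := ∀ (n : Int), Dom_int_to_barcode_py n → Pre_int_to_barcode_py n → Spec_int_to_barcode_py n (int_to_barcode_py n)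

-- ===== LEMMAS AND PROOFS =====

-- canonical msd-first digit list of a natural number, no leading zeros
def pvRecN : Nat → List Char
  | 0 => []
  | n + 1 => pvRecN ((n + 1) / 30) ++ [pvDigit (((n + 1) % 30 : Nat) : Int)]
decreasing_by exact Nat.div_lt_self (Nat.succ_pos n) (by norm_num)

theorem pvRecN_pos (m : Nat) (h : 0 < m) :
    pvRecN m = pvRecN (m / 30) ++ [pvDigit ((m % 30 : Nat) : Int)] := by
  cases m with
  | zero => omega
  | succ t => rw [pvRecN]

-- msd-first digit list of m, fixed length k+1, leading zeros allowed
def pvPadN : Nat → Nat → List Char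
  | 0, m => [pvDigit (m : Int)]
  | k + 1, m => pvDigit ((m / 30 ^ (k + 1) : Nat) : Int) :: pvPadN k (m % 30 ^ (k + 1))

theorem pvPadN_peel (k : Nat) : ∀ m : Nat,
    pvPadN (k + 1) m = pvPadN k (m / 30) ++ [pvDigit ((m % 30 : Nat) : Int)] := by
  induction k with
  | zero =>
      intro m
      simp [pvPadN]
  | succ k ih =>
      intro m
      show pvDigit ((m / 30 ^ (k + 2) : Nat) : Int) :: pvPadN (k + 1) (m % 30 ^ (k + 2))
          = (pvDigit ((m / 30 / 30 ^ (k + 1) : Nat) : Int) :: pvPadN k (m / 30 % 30 ^ (k + 1)))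
            ++ [pvDigit ((m % 30 : Nat) : Int)]
      rw [ih (m % 30 ^ (k + 2))]
      have h1 : m / 30 / 30 ^ (k + 1) = m / 30 ^ (k + 2) := by
        rw [Nat.div_div_eq_div_mul, ← Nat.pow_succ']
      have h2 : m % 30 ^ (k + 2) / 30 = m / 30 % 30 ^ (k + 1) := by
        have := Nat.mod_mul_right_div_self m 30 (30 ^ (k + 1))
        rwa [← Nat.pow_succ'] at this
      have h3 : m % 30 ^ (k + 2) % 30 = m % 30 :=
        Nat.mod_mod_of_dvd m (dvd_pow_self 30 (Nat.succ_ne_zero (k + 1)))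
      rw [h1, h2, h3]
      simp

theorem pvPadN_eq_recN : ∀ (k m : Nat), 30 ^ k ≤ m → m < 30 ^ (k + 1) → pvPadN k m = pvRecN m := by
  intro k
  induction k with
  | zero =>
      intro m h1 h2
      rw [pvPadN, pvRecN_pos m (by simpa using h1)]
      rw [Nat.div_eq_of_lt (by simpa using h2), Nat.mod_eq_of_lt (by simpa using h2)]
      simp [pvRecN]
  | succ k ih =>
      intro m h1 h2
      have h30 : (0:Nat) < 30 := by norm_num
      have hlo : 30 ^ k ≤ m / 30 := by
        rw [Nat.le_div_iff_mul_le h30, ← Nat.pow_succ]; exact h1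
      have hhi : m / 30 < 30 ^ (k + 1) := by
        rw [Nat.div_lt_iff_lt_mul h30, ← Nat.pow_succ]; exact h2
      have hm : 0 < m := lt_of_lt_of_le (Nat.pos_of_neZero (30 ^ (k + 1))) h1
      rw [pvPadN_peel, ih (m / 30) hlo hhi, ← pvRecN_pos m hm]

-- A's loop with a nonempty accumulator
theorem pvLoopA_acc (f : Nat) : ∀ (n : Int) (acc : List Char),
    pvLoopA f n acc = acc ++ pvLoopA f n [] := by
  induction f with
  | zero => intro n acc; simp [pvLoopA]
  | succ f ih =>
      intro n acc
      by_cases h : n = 0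
      · simp [pvLoopA, h]
      · simp only [pvLoopA, if_neg h]
        rw [ih _ (acc ++ _), ih _ ([] ++ _)]
        simp

-- A's reversed output is the canonical msd-first digit list
theorem pvLoopA_eq_recN : ∀ (f : Nat) (n : Int), 0 ≤ n → n.toNat < f →
    (pvLoopA f n []).reverse = pvRecN n.toNat := by
  intro f
  induction f with
  | zero => intro n _ h; omega
  | succ f ih =>
      intro n hn hf
      by_cases h : n = 0
      · simp [pvLoopA, h, pvRecN]
      · have hpos : 0 < n := lt_of_le_of_ne hn (Ne.symm h)
        have hcast : n = ((n.toNat : Nat) : Int) := (Int.toNat_of_nonneg hn).symm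
        have hdiv : PySem.Int.floordiv n 30 = ((n.toNat / 30 : Nat) : Int) := by
          rw [hcast]; exact_mod_cast PySem.Int.floordiv_natCast n.toNat 30
        have hmod : PySem.Int.mod n 30 = ((n.toNat % 30 : Nat) : Int) := by
          rw [hcast]; exact_mod_cast PySem.Int.mod_natCast n.toNat 30
        have hdivlt : (PySem.Int.floordiv n 30).toNat < f := by
          rw [hdiv]
          have : n.toNat / 30 < n.toNat := Nat.div_lt_self (by omega) (by norm_num)
          simp; omega
        have hdivnn : 0 ≤ PySem.Int.floordiv n 30 := by rw [hdiv]; positivity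
        simp only [pvLoopA, if_neg h, List.nil_append]
        rw [pvLoopA_acc, List.reverse_append, ih _ hdivnn hdivlt, hdiv, hmod,
            Int.toNat_natCast, pvRecN_pos n.toNat (by omega)]
        simp

-- B's digit loop started at p = 30^k produces the fixed-width digit list
theorem pvLoopB_eq_padN : ∀ (k : Nat) (f : Nat) (n : Int) (acc : List Char), k < f → 0 ≤ n →
    pvLoopB f ((30 ^ k : Nat) : Int) n acc = acc ++ pvPadN k n.toNat := by
  intro k
  induction k with
  | zero =>
      intro f n acc hf hn
      obtain ⟨f', rfl⟩ : ∃ f', f = f' + 1 := ⟨f - 1, by omega⟩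
      have hone : ((30 ^ 0 : Nat) : Int) = 1 := by norm_num
      rw [hone]
      simp only [pvLoopB, if_neg (by norm_num : (1:Int) ≠ 0)]
      have hd : PySem.Int.floordiv 1 30 = 0 := by decide
      have hm : PySem.Int.mod n 1 = 0 := by
        rw [PySem.Int.mod_eq_emod_of_pos (by norm_num : (0:Int) < 1)]; simp
      have hn1 : PySem.Int.floordiv n 1 = n := by
        rw [PySem.Int.floordiv_eq_ediv_of_pos (by norm_num : (0:Int) < 1)]; simp
      rw [hd, hm, hn1]
      cases f' with
      | zero => simp [pvLoopB, pvPadN, Int.toNat_of_nonneg hn]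
      | succ g => simp [pvLoopB, pvPadN, Int.toNat_of_nonneg hn]
  | succ k ih =>
      intro f n acc hf hn
      obtain ⟨f', rfl⟩ : ∃ f', f = f' + 1 := ⟨f - 1, by omega⟩
      have hpne : ((30 ^ (k + 1) : Nat) : Int) ≠ 0 := by positivity
      simp only [pvLoopB, if_neg hpne]
      have hcast : n = ((n.toNat : Nat) : Int) := (Int.toNat_of_nonneg hn).symm
      have hpd : PySem.Int.floordiv ((30 ^ (k + 1) : Nat) : Int) 30 = ((30 ^ k : Nat) : Int) := by
        have := PySem.Int.floordiv_natCast (30 ^ (k + 1)) 30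
        rw [show ((30:Nat):Int) = (30:Int) by norm_num] at this
        rw [this]
        have hq : 30 ^ (k + 1) / 30 = 30 ^ k := by rw [Nat.pow_succ]; omega
        rw [hq]
      have hmd : PySem.Int.mod n ((30 ^ (k + 1) : Nat) : Int)
          = ((n.toNat % 30 ^ (k + 1) : Nat) : Int) := by
        rw [hcast]; exact PySem.Int.mod_natCast n.toNat (30 ^ (k + 1))
      have hdd : PySem.Int.floordiv n ((30 ^ (k + 1) : Nat) : Int)
          = ((n.toNat / 30 ^ (k + 1) : Nat) : Int) := by
        rw [hcast]; exact PySem.Int.floordiv_natCast n.toNat (30 ^ (k + 1))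
      rw [hpd, hmd, hdd, ih f' _ _ (by omega) (by positivity), Int.toNat_natCast]
      show acc ++ [pvDigit ((n.toNat / 30 ^ (k + 1) : Nat) : Int)] ++ pvPadN k (n.toNat % 30 ^ (k + 1))
          = acc ++ pvPadN (k + 1) n.toNat
      rw [pvPadN]
      simp

-- the power search returns the largest power of 30 not exceeding n
theorem pvFindP_spec : ∀ (f j : Nat) (n : Int), 0 < n → ((30:Int) ^ j ≤ n) → (n < (30:Int) ^ (j + f)) →
    ∃ k : Nat, j ≤ k ∧ pvFindP f ((30:Int) ^ j) n = (30:Int) ^ k ∧ (30:Int) ^ k ≤ n ∧ n < (30:Int) ^ (k + 1) := by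
  intro f
  induction f with
  | zero =>
      intro j n _ h1 h2
      simp only [Nat.add_zero] at h2; omega
  | succ f ih =>
      intro j n hn h1 h2
      by_cases hc : (30:Int) ^ j * 30 ≤ n
      · have h1' : (30:Int) ^ (j + 1) ≤ n := by rwa [pow_succ]
        have h2' : n < (30:Int) ^ (j + 1 + f) := by
          rwa [show j + 1 + f = j + (f + 1) by omega]
        obtain ⟨k, hk1, hk2, hk3, hk4⟩ := ih (j + 1) n hn h1' h2'
        refine ⟨k, by omega, ?_, hk3, hk4⟩
        rw [pvFindP, if_pos hc, ← pow_succ]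
        exact hk2
      · exact ⟨j, le_refl j, by rw [pvFindP, if_neg hc], h1, by rw [pow_succ]; omega⟩

-- ===== VERDICT (by name: the statement is the Claim_ definition above) =====
theorem int_to_barcode_py_spec : Claim_equal_int_to_barcode_py := by
  intro n hdom hpre
  unfold Spec_int_to_barcode_py int_to_barcode_py int_to_barcode_py_alt
  by_cases h : n = 0
  · simp [h]
  · have hn : 0 < n := lt_of_le_of_ne hpre (Ne.symm h)
    have hbound : n ≤ 2147483648 := by
      unfold Dom_int_to_barcode_py pvDomInt at hdom
      simp only [decide_eq_true_eq] at hdom; exact hdom.2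
    have hlt64 : n < (30:Int) ^ (0 + 64) := by
      calc n ≤ 2147483648 := hbound
        _ < (30:Int) ^ (0 + 64) := by norm_num
    obtain ⟨k, _, hfp, hlo, hhi⟩ := pvFindP_spec 64 0 n hn (by simpa using (by omega : (1:Int) ≤ n)) hlt64
    have hk64 : k < 64 := by
      by_contra hx
      have : (30:Int) ^ 64 ≤ (30:Int) ^ k := pow_le_pow_right₀ (by norm_num) (by omega)
      have : (30:Int) ^ 64 ≤ n := le_trans this hlo
      have : n < (30:Int) ^ 64 := by
        calc n ≤ 2147483648 := hbound
          _ < (30:Int) ^ 64 := by norm_num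
      omega
    have hcastpow : (30:Int) ^ k = ((30 ^ k : Nat) : Int) := by push_cast; ring
    have hcast1 : (30:Int) ^ (k+1) = ((30 ^ (k+1) : Nat) : Int) := by push_cast; ring
    have hone : pvFindP 64 1 n = ((30 ^ k : Nat) : Int) := by
      rw [← hcastpow, ← hfp]; norm_num
    rw [if_neg h, if_neg h, hone, pvLoopB_eq_padN k 64 n [] hk64 hn.le]
    have hlon : 30 ^ k ≤ n.toNat := by
      rw [hcastpow] at hlo; omega
    have hhin : n.toNat < 30 ^ (k + 1) := by
      rw [hcast1] at hhi; omega
    rw [List.nil_append, pvPadN_eq_recN k n.toNat hlon hhin,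
        ← pvLoopA_eq_recN (n.toNat + 1) n hn.le (by omega)]
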